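-- pv_equiv track=rewrite | github.com/Gnome101/PSAT | services/discovery/inventory.py | _determine_sources
-- ===== SOURCE A (Python) =====
-- from typing import Any
--
-- def _determine_sources(evidence: list[dict[str, Any]]) -> list[str]:
--     """Derive the source list from evidence kinds present for an address."""
--     _KIND_TO_SOURCE = {
--         "official_inventory_table": "tavily_ai_inventory",
--         "official_inventory_link": "tavily_ai_inventory",
--         "official_inventory_text": "tavily_ai_inventory",
--         "deployer_expansion": "deployer_expansion",
--     }
--     sources: list[str] = []
--     seen: set[str] = set()
--     for item in evidence:
--         source = _KIND_TO_SOURCE.get(item.get("kind", ""), "tavily_ai_inventory")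
--         if source not in seen:
--             seen.add(source)
--             sources.append(source)
--     return sources
-- ===== SOURCE B (Python) =====
-- def _determine_sources(evidence):
--     """Derive the source list from evidence kinds present for an address.
--
--     Only two sources are possible: every kind except "deployer_expansion"
--     (including missing/unknown kinds) maps to "tavily_ai_inventory".  So
--     instead of a generic ordered dedup, classify each item as deployer or
--     not and decide the answer by a five-way case analysis: empty, all
--     deployer, no deployer, or both sources with the first item's class
--     fixing the order.
--     """
--     deps = [item.get("kind", "") == "deployer_expansion" for item in evidence]
--     if not deps:
--         return []
--     if all(deps):
--         return ["deployer_expansion"]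
--     if not any(deps):
--         return ["tavily_ai_inventory"]
--     if deps[0]:
--         return ["deployer_expansion", "tavily_ai_inventory"]
--     return ["tavily_ai_inventory", "deployer_expansion"]
-- ===== Notes on version B (the rewrite author's own statement) =====
-- stated objective: alternative
-- what changed: B exploits that only two sources are possible: it classifies each item as deployer/non-deployer and returns the answer by a five-way case analysis (empty, all deployer, no deployer, or both with the first item's class fixing the order), replacing A's generic seen-set ordered-dedup loop.
import Mathlib
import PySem

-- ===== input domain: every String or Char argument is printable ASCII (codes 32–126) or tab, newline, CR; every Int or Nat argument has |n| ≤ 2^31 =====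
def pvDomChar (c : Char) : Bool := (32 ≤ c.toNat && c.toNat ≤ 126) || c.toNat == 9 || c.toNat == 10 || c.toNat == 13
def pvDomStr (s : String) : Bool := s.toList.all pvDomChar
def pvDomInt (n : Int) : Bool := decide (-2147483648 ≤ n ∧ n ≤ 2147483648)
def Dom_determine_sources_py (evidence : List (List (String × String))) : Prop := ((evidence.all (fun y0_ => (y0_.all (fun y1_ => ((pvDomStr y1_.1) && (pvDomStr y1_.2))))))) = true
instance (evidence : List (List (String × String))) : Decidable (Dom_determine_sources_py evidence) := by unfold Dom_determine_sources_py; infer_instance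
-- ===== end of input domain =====

-- B replaces A's seen-set ordered-dedup loop by a case analysis on the only two
-- possible sources: classify each item as deployer/non-deployer and decide the
-- result from empty / all / none / first item's class (same cost, different algorithm).

-- ===== PORT A =====
-- the _KIND_TO_SOURCE dict literal
def pvKindToSource : PySem.Dict String String := PySem.Dict.ofList
  [("official_inventory_table", "tavily_ai_inventory"),
   ("official_inventory_link", "tavily_ai_inventory"),
   ("official_inventory_text", "tavily_ai_inventory"),
   ("deployer_expansion", "deployer_expansion")]

-- _KIND_TO_SOURCE.get(item.get("kind", ""), "tavily_ai_inventory")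
def pvSourceOf (item : List (String × String)) : String :=
  pvKindToSource.getD ((PySem.Dict.ofList item).getD "kind" "") "tavily_ai_inventory"

def determine_sources_py (evidence : List (List (String × String))) : List String :=
  (evidence.foldl (fun (st : List String × PySem.Set String) item =>
      let source := pvSourceOf item
      if PySem.Set.contains st.2 source then st
      else (st.1 ++ [source], PySem.Set.add st.2 source))
    ([], PySem.Set.empty)).1

-- ===== PORT B =====
def determine_sources_py_alt (evidence : List (List (String × String))) : List String :=
  let deps := evidence.map (fun item =>
    ((PySem.Dict.ofList item).getD "kind" "") == "deployer_expansion")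
  if deps.isEmpty then []
  else if deps.all id then ["deployer_expansion"]
  else if !(deps.any id) then ["tavily_ai_inventory"]
  else if deps.headD false then ["deployer_expansion", "tavily_ai_inventory"]
  else ["tavily_ai_inventory", "deployer_expansion"]

-- ===== PRECONDITION & SPEC =====
def Spec_determine_sources_py (evidence : List (List (String × String))) (out : List String) : Prop := out = determine_sources_py_alt evidence
instance (evidence : List (List (String × String))) (out : List String) : Decidable (Spec_determine_sources_py evidence out) := by unfold Spec_determine_sources_py; infer_instance

-- ===== CLAIM =====
def Claim_equal_determine_sources_py : Prop := ∀ (evidence : List (List (String × String))), Dom_determine_sources_py evidence → Spec_determine_sources_py evidence (determine_sources_py evidence)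

-- ===== LEMMAS AND PROOFS =====

-- the per-item deployer test B uses
def pvIsDep (item : List (String × String)) : Bool :=
  ((PySem.Dict.ofList item).getD "kind" "") == "deployer_expansion"

-- A's loop body
def pvStep (st : List String × PySem.Set String) (item : List (String × String)) :
    List String × PySem.Set String :=
  let source := pvSourceOf item
  if PySem.Set.contains st.2 source then st
  else (st.1 ++ [source], PySem.Set.add st.2 source)

lemma pv_kts (k : String) :
    pvKindToSource.getD k "tavily_ai_inventory"
    = if k == "deployer_expansion" then "deployer_expansion" else "tavily_ai_inventory" := by
  by_cases hk : k = "deployer_expansion"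
  · subst hk; decide
  · rw [if_neg (by simpa using hk)]
    have h : pvKindToSource = PySem.Dict.mk
      [("official_inventory_table", "tavily_ai_inventory"),
       ("official_inventory_link", "tavily_ai_inventory"),
       ("official_inventory_text", "tavily_ai_inventory"),
       ("deployer_expansion", "deployer_expansion")] := by decide
    rw [h, PySem.Dict.getD_eq_get?_getD]
    simp only [PySem.Dict.get?_mk_cons]
    split_ifs with h1 h2 h3 h4
    · rfl
    · rfl
    · rfl
    · exact absurd (beq_iff_eq.mp h4).symm hk
    · simp [PySem.Dict.get?]

lemma pv_source_eq (item : List (String × String)) :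
    pvSourceOf item = if pvIsDep item then "deployer_expansion" else "tavily_ai_inventory" := by
  unfold pvSourceOf pvIsDep
  rw [pv_kts]

lemma pv_any_not (xs : List (List (String × String))) :
    xs.any (fun x => !pvIsDep x) = !xs.all pvIsDep := by
  rw [List.all_eq_not_any_not]; simp

lemma pv_alt_cons (x : List (String × String)) (xs : List (List (String × String))) :
    determine_sources_py_alt (x :: xs)
    = if pvIsDep x then
        (if xs.all pvIsDep then ["deployer_expansion"]
         else ["deployer_expansion", "tavily_ai_inventory"])
      else
        (if xs.any pvIsDep then ["tavily_ai_inventory", "deployer_expansion"]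
         else ["tavily_ai_inventory"]) := by
  unfold determine_sources_py_alt pvIsDep
  cases h : ((PySem.Dict.ofList x).getD "kind" "") == "deployer_expansion" <;>
    simp [h, List.all_map, List.any_map]
  by_cases he : ∀ y ∈ xs, ¬(PySem.Dict.ofList y).getD "kind" "" = "deployer_expansion"
  · rw [if_pos he, if_neg (fun ⟨y, hy, hp⟩ => he y hy hp)]
  · rw [if_neg he, if_pos (by push Not at he; exact he)]

-- once both sources are seen, the loop no longer changes the state
lemma pv_absorb (l : List (List (String × String))) (st : List String × PySem.Set String)
    (hT : PySem.Set.contains st.2 "tavily_ai_inventory" = true)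
    (hD : PySem.Set.contains st.2 "deployer_expansion" = true) :
    l.foldl pvStep st = st := by
  induction l with
  | nil => rfl
  | cons x xs ih =>
    have hst : pvStep st x = st := by
      unfold pvStep
      rw [pv_source_eq]
      cases h : pvIsDep x <;>
        simp [(PySem.Set.contains_iff _ _).mp hT, (PySem.Set.contains_iff _ _).mp hD]
    simp [List.foldl_cons, hst, ih]

lemma pv_fromTAV (l : List (List (String × String))) :
    (l.foldl pvStep (["tavily_ai_inventory"], ["tavily_ai_inventory"])).1
    = if l.any pvIsDep then ["tavily_ai_inventory", "deployer_expansion"]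
      else ["tavily_ai_inventory"] := by
  induction l with
  | nil => rfl
  | cons x xs ih =>
    rw [List.foldl_cons]
    cases h : pvIsDep x with
    | false =>
      have hst : pvStep (["tavily_ai_inventory"], ["tavily_ai_inventory"]) x
          = (["tavily_ai_inventory"], ["tavily_ai_inventory"]) := by
        unfold pvStep; rw [pv_source_eq, h]; simp [PySem.Set.contains]
      rw [hst, ih]; simp [List.any_cons, h]
    | true =>
      have hst : pvStep (["tavily_ai_inventory"], ["tavily_ai_inventory"]) x
          = (["tavily_ai_inventory", "deployer_expansion"],
             ["tavily_ai_inventory", "deployer_expansion"]) := by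
        unfold pvStep; rw [pv_source_eq, h]; simp [PySem.Set.contains, PySem.Set.add]
      rw [hst, pv_absorb] <;> simp [PySem.Set.contains, List.any_cons, h]

lemma pv_fromDEP (l : List (List (String × String))) :
    (l.foldl pvStep (["deployer_expansion"], ["deployer_expansion"])).1
    = if l.any (fun x => !pvIsDep x) then ["deployer_expansion", "tavily_ai_inventory"]
      else ["deployer_expansion"] := by
  induction l with
  | nil => rfl
  | cons x xs ih =>
    rw [List.foldl_cons]
    cases h : pvIsDep x with
    | true =>
      have hst : pvStep (["deployer_expansion"], ["deployer_expansion"]) x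
          = (["deployer_expansion"], ["deployer_expansion"]) := by
        unfold pvStep; rw [pv_source_eq, h]; simp [PySem.Set.contains]
      rw [hst, ih]; simp [List.any_cons, h]
    | false =>
      have hst : pvStep (["deployer_expansion"], ["deployer_expansion"]) x
          = (["deployer_expansion", "tavily_ai_inventory"],
             ["deployer_expansion", "tavily_ai_inventory"]) := by
        unfold pvStep; rw [pv_source_eq, h]; simp [PySem.Set.contains, PySem.Set.add]
      rw [hst, pv_absorb] <;> simp [PySem.Set.contains, List.any_cons, h]

-- ===== VERDICT =====
theorem determine_sources_py_spec : Claim_equal_determine_sources_py := by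
  intro evidence _
  show determine_sources_py evidence = determine_sources_py_alt evidence
  cases evidence with
  | nil => rfl
  | cons x xs =>
    rw [pv_alt_cons]
    unfold determine_sources_py
    have hfold : ∀ (st : List String × PySem.Set String) l,
        List.foldl (fun (st : List String × PySem.Set String) item =>
          let source := pvSourceOf item
          if PySem.Set.contains st.2 source then st
          else (st.1 ++ [source], PySem.Set.add st.2 source)) st l = List.foldl pvStep st l := by
      intro st l; rfl
    rw [hfold, List.foldl_cons]
    cases h : pvIsDep x with
    | true =>
      have hst : pvStep ([], PySem.Set.empty) x
          = (["deployer_expansion"], ["deployer_expansion"]) := by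
        unfold pvStep; rw [pv_source_eq, h]
        simp [PySem.Set.contains, PySem.Set.empty, PySem.Set.add]
      rw [hst, pv_fromDEP, pv_any_not, if_pos rfl]
      cases xs.all pvIsDep <;> simp
    | false =>
      have hst : pvStep ([], PySem.Set.empty) x
          = (["tavily_ai_inventory"], ["tavily_ai_inventory"]) := by
        unfold pvStep; rw [pv_source_eq, h]
        simp [PySem.Set.contains, PySem.Set.empty, PySem.Set.add]
      rw [hst, pv_fromTAV]
      simp only [Bool.false_eq_true, if_false]
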